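-- pv_equiv track=rewrite | github.com/mykespb/leetcoding | lc-stringgcd.py | isdiv
-- ===== SOURCE A (Python) =====
-- def isdiv(s1: str, s2: str) -> bool:
--     """check divisibility"""
--
--     l1, l2 = len(s1), len(s2)
--     if l1 % l2:
--         return False
--
--     for chunk in range(l1 // l2 + 1):
--         if s1[chunk * l2 : (chunk+1) * l2] == s2:
--             return True
--
--     return False
-- ===== SOURCE B (Python) =====
-- def isdiv(s1: str, s2: str) -> bool:
--     """check divisibility"""
--
--     l1, l2 = len(s1), len(s2)
--     if l1 % l2:
--         return False
--
--     pos = s1.find(s2)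
--     while pos != -1:
--         if pos % l2 == 0:
--             return True
--         pos = s1.find(s2, pos + 1)
--
--     return False
-- ===== Notes on version B (the rewrite author's own statement) =====
-- stated objective: alternative
-- what changed: Instead of slicing out each aligned fixed-size window and comparing it to s2, B walks the occurrences of s2 found by the built-in substring searcher str.find and accepts the first occurrence whose position is a multiple of len(s2).
import Mathlib
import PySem

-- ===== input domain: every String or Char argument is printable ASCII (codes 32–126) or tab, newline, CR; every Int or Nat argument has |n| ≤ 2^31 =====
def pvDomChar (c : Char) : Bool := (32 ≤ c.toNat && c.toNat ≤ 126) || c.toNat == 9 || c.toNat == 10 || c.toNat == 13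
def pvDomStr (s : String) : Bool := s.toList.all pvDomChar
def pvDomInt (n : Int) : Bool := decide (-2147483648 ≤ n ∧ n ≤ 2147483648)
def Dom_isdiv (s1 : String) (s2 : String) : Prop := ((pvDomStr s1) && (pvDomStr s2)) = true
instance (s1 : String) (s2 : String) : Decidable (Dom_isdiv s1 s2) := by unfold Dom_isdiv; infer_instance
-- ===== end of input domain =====

-- B replaces A's aligned-window slicing by a walk over the occurrences str.find reports,
-- accepting the first occurrence at a position divisible by len(s2) (objective: alternative).

-- ===== PORT A =====
def isdiv (s1 : String) (s2 : String) : Bool :=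
  let l1 : Int := PySem.Str.len s1
  let l2 : Int := PySem.Str.len s2
  if PySem.Int.mod l1 l2 ≠ 0 then false
  else
    (PySem.List.pyRange 0 (PySem.Int.floordiv l1 l2 + 1)).any
      (fun chunk => PySem.Str.slice s1 (some (chunk * l2)) (some ((chunk + 1) * l2)) == s2)

-- ===== PORT B =====
-- needed by the loop's termination argument (cited in decreasing_by)
theorem isdivFindLoop_bound (s1 s2 : List Char) (start : Nat)
    (h : PySem.Chars.findFrom s1 s2 (start : Int) none ≠ -1) :
    start ≤ s1.length ∧ start ≤ (PySem.Chars.findFrom s1 s2 (start : Int) none).toNat := by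
  by_cases hk : start ≤ s1.length
  · have hs := PySem.Chars.findFrom_natCast_spec s1 s2 start hk h
    exact ⟨hk, by omega⟩
  · exfalso
    apply h
    simp only [PySem.Chars.findFrom]
    split_ifs <;> omega

-- the while loop of Source B: pos = s1.find(s2, start); test alignment; retry from pos + 1
def isdivFindLoop (s1 s2 : List Char) (l2 : Int) (start : Nat) : Bool :=
  if h : PySem.Chars.findFrom s1 s2 (start : Int) none = -1 then false
  else if PySem.Int.mod (PySem.Chars.findFrom s1 s2 (start : Int) none) l2 = 0 then true
  else isdivFindLoop s1 s2 l2 ((PySem.Chars.findFrom s1 s2 (start : Int) none).toNat + 1)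
termination_by s1.length + 1 - start
decreasing_by
  have := isdivFindLoop_bound s1 s2 start h
  omega

def isdiv_alt (s1 : String) (s2 : String) : Bool :=
  let l1 : Int := PySem.Str.len s1
  let l2 : Int := PySem.Str.len s2
  if PySem.Int.mod l1 l2 ≠ 0 then false
  else isdivFindLoop s1.toList s2.toList l2 0

-- ===== PRECONDITION & SPEC =====
-- Pre_ excludes only s2 = "", on which both A and B raise ZeroDivisionError at 'l1 % l2'.
def Pre_isdiv (s1 : String) (s2 : String) : Prop := s2 ≠ ""
instance (s1 : String) (s2 : String) : Decidable (Pre_isdiv s1 s2) := by unfold Pre_isdiv; infer_instance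
def pvWitness_isdiv : String × String := ("abab", "ab")

def Spec_isdiv (s1 : String) (s2 : String) (out : Bool) : Prop := out = isdiv_alt s1 s2
instance (s1 : String) (s2 : String) (out : Bool) : Decidable (Spec_isdiv s1 s2 out) := by unfold Spec_isdiv; infer_instance

-- ===== CLAIM (what is proved, stated in full; the proofs are below) =====
def Claim_equal_isdiv : Prop := ∀ (s1 : String) (s2 : String), Dom_isdiv s1 s2 → Pre_isdiv s1 s2 → Spec_isdiv s1 s2 (isdiv s1 s2)

-- ===== LEMMAS AND PROOFS =====

-- both programs decide the same proposition: s2 occurs in s1 at an index divisible by |s2|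

theorem isdivFindLoop_iff (s1 s2 : List Char) (l2 : Nat) (hl2 : 0 < l2) (hlen : s2.length = l2) :
    ∀ start : Nat, isdivFindLoop s1 s2 (l2 : Int) start = true ↔
      ∃ p : Nat, start ≤ p ∧ l2 ∣ p ∧ s2 <+: s1.drop p := by
  have main : ∀ n start, s1.length + 1 - start = n →
      (isdivFindLoop s1 s2 (l2 : Int) start = true ↔
        ∃ p : Nat, start ≤ p ∧ l2 ∣ p ∧ s2 <+: s1.drop p) := by
    intro n
    induction n using Nat.strong_induction_on with
    | _ n ih =>
      intro start hn
      rw [isdivFindLoop]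
      by_cases hpos : PySem.Chars.findFrom s1 s2 (start : Int) none = -1
      · rw [dif_pos hpos]
        simp only [Bool.false_eq_true, false_iff]
        rintro ⟨p, hsp, _, hpre⟩
        by_cases hk : start ≤ s1.length
        · apply (PySem.Chars.findFrom_natCast_eq_neg_one_iff s1 s2 start hk).mp hpos
          have hd : s1.drop p = (s1.drop start).drop (p - start) := by
            rw [List.drop_drop]; congr 1; omega
          rw [hd] at hpre
          exact hpre.isInfix.trans (List.drop_suffix _ _).isInfix
        · have hnil : s1.drop p = [] := List.drop_eq_nil_of_le (by omega)
          rw [hnil] at hpre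
          have hnil2 := List.prefix_nil.mp hpre
          rw [hnil2] at hlen
          simp at hlen
          omega
      · have hb := isdivFindLoop_bound s1 s2 start hpos
        have hs := PySem.Chars.findFrom_natCast_spec s1 s2 start hb.1 hpos
        rw [dif_neg hpos]
        by_cases halign : PySem.Int.mod (PySem.Chars.findFrom s1 s2 (start : Int) none) (l2 : Int) = 0
        · rw [if_pos halign]
          simp only [true_iff]
          refine ⟨(PySem.Chars.findFrom s1 s2 (start : Int) none).toNat, hb.2, ?_, hs.2.1⟩
          have hdvd : (l2 : Int) ∣ PySem.Chars.findFrom s1 s2 (start : Int) none :=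
            (PySem.Int.mod_eq_zero_iff_dvd _ _).mp halign
          have h0 : (0 : Int) ≤ PySem.Chars.findFrom s1 s2 (start : Int) none := by omega
          have : ((PySem.Chars.findFrom s1 s2 (start : Int) none).toNat : Int) =
              PySem.Chars.findFrom s1 s2 (start : Int) none := Int.toNat_of_nonneg h0
          exact_mod_cast this ▸ hdvd
        · rw [if_neg halign]
          rw [ih (s1.length + 1 - ((PySem.Chars.findFrom s1 s2 (start : Int) none).toNat + 1))
            (by omega) _ rfl]
          constructor
          · rintro ⟨p, hsp, hdvd, hpre⟩
            exact ⟨p, by omega, hdvd, hpre⟩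
          · rintro ⟨p, hsp, hdvd, hpre⟩
            refine ⟨p, ?_, hdvd, hpre⟩
            -- p is an occurrence ≥ start, so p ≥ pos by minimality, and p ≠ pos (alignment)
            have hmin : ¬ p < (PySem.Chars.findFrom s1 s2 (start : Int) none).toNat := by
              intro hlt
              exact hs.2.2 p hsp hlt hpre
            have hne : p ≠ (PySem.Chars.findFrom s1 s2 (start : Int) none).toNat := by
              intro he
              apply halign
              rw [PySem.Int.mod_eq_zero_iff_dvd]
              have h0 : (0 : Int) ≤ PySem.Chars.findFrom s1 s2 (start : Int) none := by omega
              rw [← Int.toNat_of_nonneg h0, ← he]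
              exact_mod_cast hdvd
            omega
  intro start
  exact main _ start rfl

theorem isdiv_alt_iff (s1 s2 : String) (h2 : s2.toList ≠ []) :
    isdiv_alt s1 s2 = true ↔
      (s2.toList.length ∣ s1.toList.length ∧
        ∃ p : Nat, s2.toList.length ∣ p ∧ s2.toList <+: s1.toList.drop p) := by
  have hl2 : 0 < s2.toList.length := List.length_pos_iff.mpr h2
  unfold isdiv_alt
  simp only [PySem.Str.len_eq]
  by_cases hdvd : s2.toList.length ∣ s1.toList.length
  · rw [if_neg]
    · rw [isdivFindLoop_iff s1.toList s2.toList s2.toList.length hl2 rfl 0]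
      constructor
      · rintro ⟨p, _, h⟩; exact ⟨hdvd, p, h⟩
      · rintro ⟨_, p, h⟩; exact ⟨p, Nat.zero_le p, h⟩
    · simp only [ne_eq, not_not, PySem.Int.mod_eq_zero_iff_dvd]
      exact_mod_cast hdvd
  · rw [if_pos]
    · simp only [Bool.false_eq_true, false_iff]
      rintro ⟨h, _⟩; exact hdvd h
    · simp only [ne_eq, PySem.Int.mod_eq_zero_iff_dvd]
      exact_mod_cast hdvd

theorem isdiv_iff (s1 s2 : String) (h2 : s2.toList ≠ []) :
    isdiv s1 s2 = true ↔
      (s2.toList.length ∣ s1.toList.length ∧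
        ∃ p : Nat, s2.toList.length ∣ p ∧ s2.toList <+: s1.toList.drop p) := by
  have hl2 : 0 < s2.toList.length := List.length_pos_iff.mpr h2
  unfold isdiv
  simp only [PySem.Str.len_eq]
  by_cases hdvd : s2.toList.length ∣ s1.toList.length
  · rw [if_neg]
    · rw [PySem.Int.floordiv_natCast]
      simp only [List.any_eq_true]
      constructor
      · rintro ⟨c, hc, heq⟩
        rw [PySem.List.mem_pyRange_one] at hc
        obtain ⟨hc0, _⟩ := hc
        -- the matching chunk gives the occurrence p = c.toNat * |s2|
        refine ⟨hdvd, c.toNat * s2.toList.length, dvd_mul_left _ _, ?_⟩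
        rw [beq_iff_eq, ← String.toList_inj, PySem.Str.toList_slice,
          PySem.Chars.slice_eq_listSlice] at heq
        have hc' : c = (c.toNat : Int) := (Int.toNat_of_nonneg hc0).symm
        rw [hc'] at heq
        have e1 : (c.toNat : Int) * (s2.toList.length : Int) =
            ((c.toNat * s2.toList.length : Nat) : Int) := by push_cast; ring
        have e2 : ((c.toNat : Int) + 1) * (s2.toList.length : Int) =
            (((c.toNat + 1) * s2.toList.length : Nat) : Int) := by push_cast; ring
        rw [e1, e2, PySem.List.slice_natCast] at heq
        have e3 : (c.toNat + 1) * s2.toList.length - c.toNat * s2.toList.length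
            = s2.toList.length := by ring_nf; omega
        rw [e3] at heq
        rw [List.prefix_iff_eq_take]
        exact heq.symm
      · rintro ⟨_, p, hpd, hpre⟩
        obtain ⟨c, rfl⟩ := hpd
        refine ⟨(c : Int), ?_, ?_⟩
        · rw [PySem.List.mem_pyRange_one]
          have hplt : s2.toList.length * c < s1.toList.length := by
            have hne : s1.toList.drop (s2.toList.length * c) ≠ [] := by
              intro hnil
              rw [hnil] at hpre
              exact h2 (List.prefix_nil.mp hpre)
            by_contra hge
            exact hne (List.drop_eq_nil_of_le (by omega))
          have : c ≤ s1.toList.length / s2.toList.length := by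
            rw [Nat.le_div_iff_mul_le hl2, Nat.mul_comm]
            omega
          omega
        · rw [beq_iff_eq, ← String.toList_inj, PySem.Str.toList_slice,
            PySem.Chars.slice_eq_listSlice]
          have e1 : (c : Int) * (s2.toList.length : Int) =
              ((s2.toList.length * c : Nat) : Int) := by push_cast; ring
          have e2 : ((c : Int) + 1) * (s2.toList.length : Int) =
              (((c + 1) * s2.toList.length : Nat) : Int) := by push_cast; ring
          rw [e1, e2, PySem.List.slice_natCast]
          have e3 : (c + 1) * s2.toList.length - s2.toList.length * c
              = s2.toList.length := by ring_nf; omega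
          rw [e3]
          exact (List.prefix_iff_eq_take.mp hpre).symm
    · simp only [ne_eq, not_not, PySem.Int.mod_eq_zero_iff_dvd]
      exact_mod_cast hdvd
  · rw [if_pos]
    · simp only [Bool.false_eq_true, false_iff]
      rintro ⟨h, _⟩; exact hdvd h
    · simp only [ne_eq, PySem.Int.mod_eq_zero_iff_dvd]
      exact_mod_cast hdvd

-- ===== VERDICT (by name: the statement is the Claim_ definition above) =====
theorem isdiv_spec : Claim_equal_isdiv := by
  intro s1 s2 _ hpre
  unfold Spec_isdiv
  have h2 : s2.toList ≠ [] := fun h => hpre (String.toList_eq_nil_iff.mp h)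
  rw [Bool.eq_iff_iff, isdiv_iff s1 s2 h2, isdiv_alt_iff s1 s2 h2]
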